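-- pv_equiv track=rewrite | github.com/MousePotatoDoesStuff/Miniprojects | code_practice_sites/leetcode/0k/0k0/51.py | solveForStep
-- ===== SOURCE A (Python) =====
-- def solveForStep(T, n):
--     m = len(T)
--     busy = set()
--
--     for e in T:
--         if e >= m:
--             busy.add(e - m)
--         if n - e > m:
--             busy.add(e + m)
--         busy.add(e)
--         m -= 1
--     RES = set()
--     for i in range(n):
--         if i not in busy:
--             RES.add(T + (i,))
--     return RES
-- ===== SOURCE B (Python) =====
-- def solveForStep(T, n):
--     L = len(T)
--     return {T + (i,) for i in range(n)
--             if all(i != e and abs(i - e) != L - idx for idx, e in enumerate(T))}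
-- ===== Notes on version B (the rewrite author's own statement) =====
-- stated objective: idiomatic
-- what changed: Drops the precomputed forbidden-column set built with a decrementing counter; instead a single set comprehension rescans the placed queens per candidate column with all(i != e and abs(i - e) != dist).
import Mathlib
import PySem

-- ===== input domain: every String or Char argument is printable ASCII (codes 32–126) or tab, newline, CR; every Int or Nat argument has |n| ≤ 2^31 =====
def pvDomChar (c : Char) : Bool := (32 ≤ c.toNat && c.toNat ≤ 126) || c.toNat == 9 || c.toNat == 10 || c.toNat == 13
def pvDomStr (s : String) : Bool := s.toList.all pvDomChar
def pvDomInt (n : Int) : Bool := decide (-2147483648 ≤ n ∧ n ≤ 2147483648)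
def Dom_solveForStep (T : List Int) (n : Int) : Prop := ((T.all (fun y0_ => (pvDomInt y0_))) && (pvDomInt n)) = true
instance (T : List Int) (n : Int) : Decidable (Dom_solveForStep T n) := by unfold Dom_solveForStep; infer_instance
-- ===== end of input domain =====

-- B replaces A's precomputed forbidden-column set by a per-candidate rescan of the
-- placed queens (idiomatic set comprehension); return values agree exactly.

-- ===== PORT A =====
def solveForStep (T : List Int) (n : Int) : List (List Int) :=
  let st := T.foldl (fun (st : PySem.Set Int × Int) e =>
      let busy := st.1
      let m := st.2
      let busy := if e ≥ m then PySem.Set.add busy (e - m) else busy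
      let busy := if n - e > m then PySem.Set.add busy (e + m) else busy
      (PySem.Set.add busy e, m - 1)) (PySem.Set.empty, (T.length : Int))
  (PySem.List.pyRange 0 n 1).foldl (fun RES i =>
      if PySem.Set.contains st.1 i then RES else PySem.Set.add RES (T ++ [i]))
    PySem.Set.empty

-- ===== PORT B =====
def solveForStep_alt (T : List Int) (n : Int) : List (List Int) :=
  let L : Int := T.length
  PySem.Set.ofList
    (((PySem.List.pyRange 0 n 1).filter (fun i =>
        (PySem.List.enumerate T).all (fun p =>
          i != p.2 && |i - p.2| != L - p.1))).map (fun i => T ++ [i]))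

-- ===== PRECONDITION & SPEC =====
def Spec_solveForStep (T : List Int) (n : Int) (out : List (List Int)) : Prop := out = solveForStep_alt T n
instance (T : List Int) (n : Int) (out : List (List Int)) : Decidable (Spec_solveForStep T n out) := by unfold Spec_solveForStep; infer_instance

-- ===== CLAIM (what is proved, stated in full; the proofs are below) =====
def Claim_equal_solveForStep : Prop := ∀ (T : List Int) (n : Int), Dom_solveForStep T n → Spec_solveForStep T n (solveForStep T n)

-- ===== LEMMAS AND PROOFS =====

-- membership condition generated by A's first loop (busy set), with running distance m
def conflictP (n : Int) : List Int → Int → Int → Prop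
  | [], _, _ => False
  | e :: r, m, i => (e ≥ m ∧ i = e - m) ∨ (n - e > m ∧ i = e + m) ∨ i = e ∨ conflictP n r (m - 1) i

-- B's per-candidate test, with running distance m
def okP : List Int → Int → Int → Prop
  | [], _, _ => True
  | e :: r, m, i => (i ≠ e ∧ |i - e| ≠ m) ∧ okP r (m - 1) i

theorem mem_fold_busy (n : Int) : ∀ (T : List Int) (s : PySem.Set Int) (m i : Int),
    (i ∈ (T.foldl (fun (st : PySem.Set Int × Int) e =>
      (PySem.Set.add (if n - e > st.2
          then PySem.Set.add (if e ≥ st.2 then PySem.Set.add st.1 (e - st.2) else st.1) (e + st.2)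
          else if e ≥ st.2 then PySem.Set.add st.1 (e - st.2) else st.1) e,
        st.2 - 1)) (s, m)).1) ↔ i ∈ s ∨ conflictP n T m i := by
  intro T
  induction T with
  | nil => intro s m i; simp [conflictP]
  | cons e r ih =>
    intro s m i
    simp only [List.foldl_cons]
    rw [ih]
    split_ifs <;> simp [PySem.Set.mem_add, conflictP, *] <;> tauto

theorem all_enumerate_ok (L : Int) : ∀ (T : List Int) (s i : Int),
    ((PySem.List.enumerate T s).all (fun p =>
        i != p.2 && |i - p.2| != L - p.1) = true) ↔ okP T (L - s) i := by
  intro T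
  induction T with
  | nil => intro s i; simp [PySem.List.enumerate_nil, okP]
  | cons e r ih =>
    intro s i
    rw [PySem.List.enumerate_cons]
    have h : L - (s + 1) = (L - s) - 1 := by ring
    simp [okP, ← h, ih, and_assoc]

theorem conflict_iff_not_ok (n : Int) : ∀ (T : List Int) (i : Int), 0 ≤ i → i < n →
    (conflictP n T (T.length : Int) i ↔ ¬ okP T (T.length : Int) i) := by
  intro T
  induction T with
  | nil => intro i h0 h1; simp [conflictP, okP]
  | cons e r ih =>
    intro i h0 h1
    have hm : ((e :: r).length : Int) - 1 = (r.length : Int) := by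
      push_cast [List.length_cons]; ring
    have harith : ((e ≥ ((e :: r).length : Int) ∧ i = e - ((e :: r).length : Int)) ∨
        (n - e > ((e :: r).length : Int) ∧ i = e + ((e :: r).length : Int)) ∨ i = e)
        ↔ ¬ (i ≠ e ∧ |i - e| ≠ ((e :: r).length : Int)) := by
      rw [Int.abs_eq_natAbs]
      omega
    simp only [conflictP, okP, hm]
    rw [ih i h0 h1]
    tauto

theorem foldl_res (busy : PySem.Set Int) (T : List Int) :
    ∀ (l : List Int) (s : PySem.Set (List Int)), l.Nodup → (∀ i ∈ l, (T ++ [i]) ∉ s) →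
    l.foldl (fun RES i =>
        if PySem.Set.contains busy i then RES else PySem.Set.add RES (T ++ [i])) s
      = s ++ (l.filter (fun i => !(PySem.Set.contains busy i))).map (fun i => T ++ [i]) := by
  intro l
  induction l with
  | nil => intro s _ _; simp
  | cons a l ih =>
    intro s hnd hmem
    rcases List.nodup_cons.mp hnd with ⟨ha, hl⟩
    by_cases h : a ∈ busy
    · have hc : PySem.Set.contains busy a = true := (PySem.Set.contains_iff busy a).mpr h
      simp only [List.foldl_cons, hc, if_true]
      rw [ih s hl (fun i hi => hmem i (List.mem_cons_of_mem _ hi))]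
      simp [h]
    · have hc : PySem.Set.contains busy a = false := by
        simp [h]
      have hadd : PySem.Set.add s (T ++ [a]) = s ++ [T ++ [a]] :=
        PySem.Set.add_of_not_mem (hmem a List.mem_cons_self)
      simp only [List.foldl_cons, hc, if_false, Bool.false_eq_true, hadd]
      rw [ih (s ++ [T ++ [a]]) hl]
      · simp [h]
      · intro i hi
        simp only [List.mem_append, List.mem_singleton]
        rintro (hs | he)
        · exact hmem i (List.mem_cons_of_mem _ hi) hs
        · have hia : i = a := by
            have := List.append_cancel_left he
            simpa using this
          exact ha (hia ▸ hi)

theorem append_inj (T : List Int) : Function.Injective (fun i : Int => T ++ [i]) := by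
  intro a b h
  have := List.append_cancel_left h
  simpa using this

-- ===== VERDICT (by name: the statement is the Claim_ definition above) =====
theorem bool_eq_of_iff {a b : Bool} (h : a = true ↔ b = true) : a = b := by
  cases a <;> cases b <;> simp_all

theorem solveForStep_spec : Claim_equal_solveForStep := by
  unfold Claim_equal_solveForStep
  intro T n _
  unfold Spec_solveForStep solveForStep solveForStep_alt
  simp only []
  rw [foldl_res _ T _ PySem.Set.empty (PySem.List.nodup_pyRange_one 0 n)
    (by intro i _ h; simp [PySem.Set.empty] at h)]
  rw [PySem.Set.ofList_eq_self_of_nodup _ (by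
    apply List.Nodup.map_on (fun x _ y _ h => append_inj T h)
    exact (PySem.List.nodup_pyRange_one 0 n).filter _)]
  simp only [PySem.Set.empty, List.nil_append]
  congr 1
  apply List.filter_congr
  intro i hi
  rcases (PySem.List.mem_pyRange_one).mp hi with ⟨h0, h1⟩
  have hok' : ((PySem.List.enumerate T).all (fun p =>
      i != p.2 && |i - p.2| != (T.length : Int) - p.1) = true)
      ↔ okP T (T.length : Int) i := by
    have := all_enumerate_ok (T.length : Int) T 0 i
    simpa using this
  apply bool_eq_of_iff
  rw [Bool.not_eq_true', Bool.eq_false_iff, Ne, PySem.Set.contains_iff,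
    mem_fold_busy n T [] (T.length : Int) i, hok']
  simp only [List.not_mem_nil, false_or]
  rw [conflict_iff_not_ok n T i h0 h1, not_not]
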